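-- pv_equiv track=rewrite | github.com/rlzh/mec | shared/utils.py | get_shared_words
-- ===== SOURCE A (Python) =====
-- def get_shared_words(lyrics):
--     '''
--     Return shared words & unique ngrams over all classes in lyrics
--     '''
--     shared_words = set()
--     unique_words = set()
--     hashed_data = []
--     for row in lyrics:
--         hashed_data.append(set(row))
--     for row in lyrics:
--         for word in row:
--             if word in shared_words:
--                 continue
--             unique_words.add(word)
--             is_shared = True
--             for other_row in hashed_data:
--                 if word not in other_row:
--                     is_shared = False
--                     break
--             if is_shared:
--                 shared_words.add(word)
--     return shared_words, unique_words
-- ===== SOURCE B (Python) =====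
-- def get_shared_words(lyrics):
--     '''
--     Return shared words & unique ngrams over all classes in lyrics
--     '''
--     counts = {}
--     for row in lyrics:
--         seen = set()
--         for word in row:
--             if word not in seen:
--                 seen.add(word)
--                 counts[word] = counts.get(word, 0) + 1
--     n = len(lyrics)
--     shared_words = {w for w, c in counts.items() if c == n}
--     unique_words = set(counts)
--     return shared_words, unique_words
-- ===== Notes on version B (the rewrite author's own statement) =====
-- stated objective: alternative
-- what changed: Replaces A's triple-nested loop (for every word occurrence, test membership in every row's set) with a single counting pass: a dict maps each word to the number of rows containing it (counted once per row via a per-row seen set), and a word is shared iff its count equals the number of rows.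
import Mathlib
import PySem

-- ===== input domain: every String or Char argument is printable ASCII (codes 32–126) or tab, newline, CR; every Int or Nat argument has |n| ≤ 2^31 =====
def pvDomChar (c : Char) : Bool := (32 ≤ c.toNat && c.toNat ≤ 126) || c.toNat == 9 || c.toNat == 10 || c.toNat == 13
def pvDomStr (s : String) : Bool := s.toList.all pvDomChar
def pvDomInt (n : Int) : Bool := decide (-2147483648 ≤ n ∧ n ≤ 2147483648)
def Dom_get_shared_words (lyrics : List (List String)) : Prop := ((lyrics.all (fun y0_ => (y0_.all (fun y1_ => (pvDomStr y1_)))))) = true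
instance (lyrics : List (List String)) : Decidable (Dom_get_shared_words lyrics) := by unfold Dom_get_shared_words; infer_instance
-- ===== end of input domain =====

-- B replaces A's per-occurrence scan over all row sets by a single counting pass: a dict maps each
-- word to the number of rows containing it (counted once per row); shared ⇔ count = number of rows.


-- ===== PORT A =====
-- 'word in every row set' (the inner 'for other_row … break' loop computes this all())
def allContain (rs : List (PySem.Set String)) (word : String) : Bool :=
  rs.all (fun other_row => PySem.Set.contains other_row word)

-- the body of A's word loop
def aStep (hashed_data : List (PySem.Set String))
    (st : PySem.Set String × PySem.Set String) (word : String) :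
    PySem.Set String × PySem.Set String :=
  let (shared_words, unique_words) := st
  if PySem.Set.contains shared_words word then st
  else
    let unique_words := PySem.Set.add unique_words word
    let is_shared := allContain hashed_data word
    if is_shared then (PySem.Set.add shared_words word, unique_words)
    else (shared_words, unique_words)

def get_shared_words (lyrics : List (List String)) : List String × List String :=
  let hashed_data : List (PySem.Set String) :=
    lyrics.foldl (fun acc row => acc ++ [PySem.Set.ofList row]) []
  lyrics.foldl (fun st row => row.foldl (aStep hashed_data) st)
    (PySem.Set.empty, PySem.Set.empty)

-- ===== PORT B =====
-- the body of B's inner word loop: state = (seen, counts); each word counted once per row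
def bStep (st : PySem.Set String × PySem.Dict String Int) (word : String) :
    PySem.Set String × PySem.Dict String Int :=
  let (seen, counts) := st
  if PySem.Set.contains seen word then st
  else (PySem.Set.add seen word, counts.insert word (counts.getD word 0 + 1))

def get_shared_words_alt (lyrics : List (List String)) : List String × List String :=
  let counts : PySem.Dict String Int :=
    lyrics.foldl (fun counts row => (row.foldl bStep (PySem.Set.empty, counts)).2)
      PySem.Dict.empty
  let n : Int := lyrics.length
  let shared_words :=
    PySem.Set.ofList (((counts.items).filter (fun p => p.2 == n)).map Prod.fst)
  let unique_words := PySem.Set.ofList counts.keys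
  (shared_words, unique_words)

-- ===== PRECONDITION & SPEC =====
def Spec_get_shared_words (lyrics : List (List String)) (out : List String × List String) : Prop := out = get_shared_words_alt lyrics
instance (lyrics : List (List String)) (out : List String × List String) : Decidable (Spec_get_shared_words lyrics out) := by unfold Spec_get_shared_words; infer_instance

-- ===== CLAIM (what is proved, stated in full; the proofs are below) =====
def Claim_equal_get_shared_words : Prop := ∀ (lyrics : List (List String)), Dom_get_shared_words lyrics → Spec_get_shared_words lyrics (get_shared_words lyrics)

-- ===== LEMMAS AND PROOFS =====

-- ---- A-side: A's fold computes (dedup of the shared words of flatten, dedup of flatten) ----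

-- filtering commutes with Set.add when the predicate holds of the added element (and drops it otherwise)
theorem filter_add (p : String → Bool) (s : PySem.Set String) (x : String) :
    (PySem.Set.add s x).filter p =
      if p x then PySem.Set.add (s.filter p) x else s.filter p := by
  by_cases hx : x ∈ s
  · rw [PySem.Set.add_of_mem hx]
    by_cases hp : p x
    · have : x ∈ s.filter p := List.mem_filter.2 ⟨hx, hp⟩
      rw [if_pos hp, PySem.Set.add_of_mem this]
    · rw [if_neg hp]
  · rw [PySem.Set.add_of_not_mem hx, List.filter_append]
    by_cases hp : p x
    · have : x ∉ s.filter p := fun h => hx (List.mem_filter.1 h).1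
      rw [if_pos hp, PySem.Set.add_of_not_mem this]
      simp [hp]
    · simp [hp]

-- first-occurrence dedup commutes with filter
theorem ofList_filter (p : String → Bool) (xs : List String) :
    PySem.Set.ofList (xs.filter p) = (PySem.Set.ofList xs).filter p := by
  induction xs using List.reverseRecOn with
  | nil => rfl
  | append_singleton xs x ih =>
    rw [List.filter_append, PySem.Set.ofList_append_singleton, filter_add]
    by_cases hp : p x
    · simp only [hp, List.filter_cons, List.filter_nil,
        PySem.Set.ofList_append_singleton, ih, if_pos]
    · simp [hp, ih]

-- one step of A's word loop, on the invariant state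
theorem aStep_inv (rs : List (PySem.Set String)) (pref : List String) (w : String) :
    aStep rs (PySem.Set.ofList (pref.filter (allContain rs)), PySem.Set.ofList pref) w
      = (PySem.Set.ofList ((pref ++ [w]).filter (allContain rs)),
         PySem.Set.ofList (pref ++ [w])) := by
  unfold aStep
  show (if (PySem.Set.ofList (List.filter (allContain rs) pref)).contains w = true then
      (PySem.Set.ofList (List.filter (allContain rs) pref), PySem.Set.ofList pref)
    else
      if allContain rs w = true then
        ((PySem.Set.ofList (List.filter (allContain rs) pref)).add w,
         (PySem.Set.ofList pref).add w)
      else (PySem.Set.ofList (List.filter (allContain rs) pref),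
            (PySem.Set.ofList pref).add w)) = _
  rw [PySem.Set.ofList_append_singleton, List.filter_append]
  by_cases hc : (PySem.Set.ofList (List.filter (allContain rs) pref)).contains w = true
  · have hmem : w ∈ List.filter (allContain rs) pref :=
      (PySem.Set.mem_ofList _ _).1 ((PySem.Set.contains_iff _ _).1 hc)
    have hw : w ∈ pref := (List.mem_filter.1 hmem).1
    have hp : allContain rs w = true := (List.mem_filter.1 hmem).2
    rw [if_pos hc, List.filter_cons, if_pos hp, List.filter_nil,
      PySem.Set.ofList_append_singleton,
      PySem.Set.add_of_mem ((PySem.Set.mem_ofList _ _).2 hmem),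
      PySem.Set.add_of_mem ((PySem.Set.mem_ofList _ _).2 hw)]
  · rw [if_neg hc]
    by_cases hp : allContain rs w = true
    · rw [if_pos hp, List.filter_cons, if_pos hp, List.filter_nil,
        PySem.Set.ofList_append_singleton]
    · rw [if_neg hp, List.filter_cons, if_neg hp, List.filter_nil, List.append_nil]

-- invariant of A's word loop: the state after a prefix is (dedup of the shared prefix words, dedup of the prefix)
theorem loop_inv (rs : List (PySem.Set String)) (ws pref : List String) :
    ws.foldl (aStep rs)
      (PySem.Set.ofList (pref.filter (allContain rs)), PySem.Set.ofList pref)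
    = (PySem.Set.ofList ((pref ++ ws).filter (allContain rs)),
       PySem.Set.ofList (pref ++ ws)) := by
  induction ws generalizing pref with
  | nil => simp
  | cons w ws ih =>
    rw [List.foldl_cons, aStep_inv, ih (pref ++ [w])]
    simp

-- ---- B-side: the counter fold ----

-- the count of w gains 1 exactly when w occurs in the row and was not yet seen
theorem bStep_getD (ws : List String) (s : PySem.Set String) (c : PySem.Dict String Int)
    (w : String) :
    ((ws.foldl bStep (s, c)).2).getD w 0
      = c.getD w 0 + (if w ∈ ws ∧ w ∉ s then 1 else 0) := by
  induction ws generalizing s c with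
  | nil => simp
  | cons v ws ih =>
    rw [List.foldl_cons]
    by_cases h : PySem.Set.contains s v = true
    · have hv : v ∈ s := (PySem.Set.contains_iff _ _).1 h
      simp only [bStep, h, if_pos, ih]
      by_cases hw : w = v
      · subst hw; simp [hv]
      · simp [List.mem_cons, hw]
    · simp only [bStep, h, if_neg, Bool.false_eq_true, not_false_iff, ih]
      by_cases hw : w = v
      · subst hw
        have hns : w ∉ s := fun hm => h ((PySem.Set.contains_iff _ _).2 hm)
        simp [PySem.Dict.getD_insert_self, hns]
      · rw [PySem.Dict.getD_insert_of_ne c _ _ hw]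
        have : (w ∈ ws ∧ w ∉ PySem.Set.add s v) ↔ (w ∈ v :: ws ∧ w ∉ s) := by
          simp [PySem.Set.mem_add, List.mem_cons, hw]
        rw [if_congr this rfl rfl]

-- the keys after a row: every row word appended if new (needs seen ⊆ keys)
theorem bStep_keys (ws : List String) (s : PySem.Set String) (c : PySem.Dict String Int)
    (hs : ∀ w ∈ s, w ∈ c.keys) :
    ((ws.foldl bStep (s, c)).2).keys = PySem.Set.update c.keys ws := by
  induction ws generalizing s c with
  | nil => rfl
  | cons w ws ih =>
    rw [List.foldl_cons, PySem.Set.update_cons]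
    by_cases h : PySem.Set.contains s w = true
    · have hm : w ∈ s := (PySem.Set.contains_iff _ _).1 h
      rw [PySem.Set.add_of_mem (hs w hm)]
      simp only [bStep, h, if_pos]
      exact ih s c hs
    · simp only [bStep, h, if_neg, Bool.false_eq_true, not_false_iff]
      have hkeys : (c.insert w (c.getD w 0 + 1)).keys = PySem.Set.add c.keys w := by
        by_cases hk : w ∈ c.keys
        · rw [PySem.Set.add_of_mem hk, PySem.Dict.keys_insert_of_contains]
          exact (PySem.Dict.contains_iff_mem_keys _ _).2 hk
        · rw [PySem.Set.add_of_not_mem hk, PySem.Dict.keys_insert_of_not_contains]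
          exact Bool.not_eq_true _ ▸ fun hc => hk ((PySem.Dict.contains_iff_mem_keys _ _).1 hc)
      rw [← hkeys]
      refine ih _ _ (fun v hv => ?_)
      rcases (PySem.Set.mem_add _ _ _).1 hv with hv | hv
      · exact (PySem.Dict.mem_keys_insert _ _ _ _).2 (Or.inr (hs v hv))
      · exact (PySem.Dict.mem_keys_insert _ _ _ _).2 (Or.inl hv)

-- the outer fold: value of w = starting value + number of processed rows containing w
theorem outer_getD (rows : List (List String)) (c : PySem.Dict String Int) (w : String) :
    (rows.foldl (fun counts row => (row.foldl bStep (PySem.Set.empty, counts)).2) c).getD w 0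
      = c.getD w 0 + (rows.countP (fun row => decide (w ∈ row)) : Int) := by
  induction rows generalizing c with
  | nil => simp
  | cons row rows ih =>
    rw [List.foldl_cons, ih, bStep_getD, List.countP_cons]
    have : (w ∈ row ∧ w ∉ PySem.Set.empty) ↔ w ∈ row := by simp [PySem.Set.empty]
    rw [if_congr this rfl rfl]
    by_cases hw : w ∈ row
    · simp only [hw, if_true, decide_true, List.countP_cons_of_pos]
      push_cast; ring
    · simp [hw]

-- the outer fold: the keys are the first occurrences of all words in row order
theorem outer_keys (rows : List (List String)) (c : PySem.Dict String Int) :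
    (rows.foldl (fun counts row => (row.foldl bStep (PySem.Set.empty, counts)).2) c).keys
      = PySem.Set.update c.keys rows.flatten := by
  induction rows generalizing c with
  | nil => simp [PySem.Set.update]
  | cons row rows ih =>
    rw [List.foldl_cons, ih, bStep_keys row PySem.Set.empty c (by simp [PySem.Set.empty]),
      List.flatten_cons, PySem.Set.update_append]

-- the two shared-word tests agree: count = #rows  ⇔  the word is in every row set
theorem pred_eq (lyrics : List (List String)) (w : String) :
    (((lyrics.countP (fun row => decide (w ∈ row)) : Nat) : Int) == (lyrics.length : Int))
      = allContain (lyrics.map PySem.Set.ofList) w := by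
  have h1 : (((lyrics.countP (fun row => decide (w ∈ row)) : Nat) : Int) == (lyrics.length : Int)) = true
      ↔ ∀ row ∈ lyrics, w ∈ row := by
    rw [beq_iff_eq, Int.natCast_inj, List.countP_eq_length]
    simp
  have h2 : allContain (lyrics.map PySem.Set.ofList) w = true
      ↔ ∀ row ∈ lyrics, w ∈ row := by
    simp [allContain, PySem.Set.mem_ofList]
  rw [Bool.eq_iff_iff, h1, h2]

-- ===== VERDICT (by name: the statement is the Claim_ definition above) =====
theorem get_shared_words_spec : Claim_equal_get_shared_words := by
  intro lyrics _
  show get_shared_words lyrics = get_shared_words_alt lyrics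
  unfold get_shared_words get_shared_words_alt
  rw [PySem.List.foldl_append_singleton_eq_map]
  simp only [List.nil_append]
  rw [← List.foldl_flatten]
  have hA : List.foldl (aStep (List.map PySem.Set.ofList lyrics))
      (PySem.Set.empty, PySem.Set.empty) lyrics.flatten
      = (PySem.Set.ofList (lyrics.flatten.filter (allContain (List.map PySem.Set.ofList lyrics))),
         PySem.Set.ofList lyrics.flatten) := loop_inv _ lyrics.flatten []
  rw [hA]
  -- B side
  set C := lyrics.foldl (fun counts row => (row.foldl bStep (PySem.Set.empty, counts)).2)
    PySem.Dict.empty with hC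
  have hkeys : C.keys = PySem.Set.ofList lyrics.flatten := by
    rw [hC, outer_keys]
    simp [PySem.Dict.keys, PySem.Dict.empty, PySem.Set.update_nil_left]
  have hnd : C.keys.Nodup := hkeys ▸ PySem.Set.nodup_ofList _
  have hval : ∀ w, C.getD w 0 = (lyrics.countP (fun row => decide (w ∈ row)) : Int) := by
    intro w; rw [hC, outer_getD]; simp [PySem.Dict.getD_empty]
  rw [PySem.Dict.items_eq_map_keys C hnd 0, List.filter_map, List.map_map]
  have hfst : (Prod.fst ∘ fun k => (k, C.getD k 0)) = id := rfl
  rw [hfst, List.map_id]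
  have hfilter : C.keys.filter ((fun p : String × Int => p.2 == (lyrics.length : Int)) ∘
        (fun k => (k, C.getD k 0)))
      = C.keys.filter (allContain (lyrics.map PySem.Set.ofList)) := by
    apply List.filter_congr
    intro w _
    show (C.getD w 0 == (lyrics.length : Int)) = _
    rw [hval w, pred_eq]
  rw [hfilter, hkeys, ← ofList_filter, PySem.Set.ofList_ofList,
    PySem.Set.ofList_eq_self_of_nodup _ (PySem.Set.nodup_ofList _)]
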